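-- pv_equiv track=rewrite | github.com/materialsproject/pymatgen | src/pymatgen/analysis/prototypes/__init__.py | _find_translations
-- ===== SOURCE A (Python) =====
-- from collections import Counter, defaultdict
--
-- def _find_translations(dict1: dict[str, int], dict2: dict[str, int]) -> list[dict[str, str]]:
--     """Find all possible translations between two dictionaries."""
--     if Counter(dict1.values()) != Counter(dict2.values()):
--         return []
--
--     keys2 = list(dict2.keys())
--     used = set()
--
--     def backtrack(translation, index):
--         if index == len(dict1):
--             return [translation.copy()]
--
--         key1 = list(dict1.keys())[index]
--         value1 = dict1[key1]
--         valid_translations = []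
--
--         for key2 in keys2:
--             if key2 not in used and dict2[key2] == value1:
--                 used.add(key2)
--                 translation[key1] = key2
--                 valid_translations.extend(backtrack(translation, index + 1))
--                 used.remove(key2)
--                 del translation[key1]
--
--         return valid_translations
--
--     return backtrack({}, 0)
-- ===== SOURCE B (Python) =====
-- from collections import Counter
--
-- def _find_translations(dict1: dict[str, int], dict2: dict[str, int]) -> list[dict[str, str]]:
--     """Find all possible translations between two dictionaries."""
--     if Counter(dict1.values()) != Counter(dict2.values()):
--         return []
--
--     results = [{}]
--     for key1, value1 in dict1.items():
--         new = []
--         for partial in results: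
--             for key2, value2 in dict2.items():
--                 if value2 == value1 and key2 not in partial.values():
--                     new.append({**partial, key1: key2})
--         results = new
--     return results
-- ===== Notes on version B (the rewrite author's own statement) =====
-- stated objective: alternative
-- what changed: Replaced the recursive DFS backtracking (with a mutated 'used' set and translation dict) by an iterative breadth-first build: a list of partial translations is extended key-by-key of dict1 in one loop nest, enumerating the same lexicographic order.
import Mathlib
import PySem

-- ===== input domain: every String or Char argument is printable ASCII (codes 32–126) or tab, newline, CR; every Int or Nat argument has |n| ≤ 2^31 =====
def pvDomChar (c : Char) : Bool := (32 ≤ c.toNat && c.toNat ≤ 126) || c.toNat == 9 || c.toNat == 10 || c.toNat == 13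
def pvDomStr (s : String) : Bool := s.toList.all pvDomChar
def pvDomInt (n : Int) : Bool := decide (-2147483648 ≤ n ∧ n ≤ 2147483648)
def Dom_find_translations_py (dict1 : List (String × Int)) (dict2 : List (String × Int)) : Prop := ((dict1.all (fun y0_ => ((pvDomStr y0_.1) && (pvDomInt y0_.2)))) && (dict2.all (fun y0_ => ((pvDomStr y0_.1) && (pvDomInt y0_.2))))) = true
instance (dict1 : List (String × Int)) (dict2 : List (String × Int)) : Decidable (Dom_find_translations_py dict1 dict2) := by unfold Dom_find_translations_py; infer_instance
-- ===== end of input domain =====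

-- B replaces A's recursive DFS backtracking by an iterative breadth-first build of partial
-- translations (same output list, same order); objective: alternative decomposition.
-- A mutates only its local 'used'/'translation'; no argument mutation is observable.

-- ===== PORT A =====
-- 'Counter(dict1.values()) != Counter(dict2.values())' — the guard line shared verbatim by A and B.
-- Python's Counter == compares the two counters as mappings (order-insensitive).
def pvValuesCounterEq (dict1 : List (String × Int)) (dict2 : List (String × Int)) : Bool :=
  let c1 := PySem.Dict.counter (dict1.map Prod.snd)
  let c2 := PySem.Dict.counter (dict2.map Prod.snd)
  PySem.Set.equal (PySem.Dict.keys c1) (PySem.Dict.keys c2) &&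
    (PySem.Dict.keys c1).all (fun k => PySem.Dict.getD c1 k 0 == PySem.Dict.getD c2 k 0)

-- backtrack(translation, index): recursion over the remaining entries of dict1 (key1 = the
-- key at 'index', value1 = dict1[key1]); 'used' and 'translation' are threaded functionally
-- (Python mutates and restores them around the recursive call). Since the loop guard ensures
-- key2 ∉ used, 'used.add(key2)' appends, and 'translation[key1] = key2' appends a fresh key.
def find_translations_py_go (dict2 : List (String × Int)) (used : List String)
    (translation : List (String × String)) :
    List (String × Int) → List (List (String × String))
  | [] => [translation]
  | (key1, value1) :: rest =>
      dict2.foldl (fun acc kv =>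
        if !used.contains kv.1 && kv.2 == value1 then
          acc ++ find_translations_py_go dict2 (used ++ [kv.1]) (translation ++ [(key1, kv.1)]) rest
        else acc) []

def find_translations_py (dict1 : List (String × Int)) (dict2 : List (String × Int)) :
    List (List (String × String)) :=
  if !pvValuesCounterEq dict1 dict2 then []
  else find_translations_py_go dict2 [] [] dict1

-- ===== PORT B =====
-- iterative breadth-first build: results starts at [{}] and is re-built once per key of dict1.
-- '{**partial, key1: key2}' appends: key1 is fresh for every partial built so far.
def find_translations_py_alt (dict1 : List (String × Int)) (dict2 : List (String × Int)) :
    List (List (String × String)) :=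
  if !pvValuesCounterEq dict1 dict2 then []
  else
    dict1.foldl (fun results kv1 =>
      results.foldl (fun new p =>
        dict2.foldl (fun new2 kv2 =>
          if kv2.2 == kv1.2 && !(p.map Prod.snd).contains kv2.1 then
            new2 ++ [p ++ [(kv1.1, kv2.1)]]
          else new2) new) []) [[]]

-- ===== PRECONDITION & SPEC =====
def Spec_find_translations_py (dict1 : List (String × Int)) (dict2 : List (String × Int)) (out : List (List (String × String))) : Prop := out = find_translations_py_alt dict1 dict2
instance (dict1 : List (String × Int)) (dict2 : List (String × Int)) (out : List (List (String × String))) : Decidable (Spec_find_translations_py dict1 dict2 out) := by unfold Spec_find_translations_py; infer_instance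

-- ===== CLAIM (what is proved, stated in full; the proofs are below) =====
def Claim_equal_find_translations_py : Prop := ∀ (dict1 : List (String × Int)) (dict2 : List (String × Int)), Dom_find_translations_py dict1 dict2 → Spec_find_translations_py dict1 dict2 (find_translations_py dict1 dict2)

-- ===== LEMMAS AND PROOFS =====

-- 'if c then acc ++ g x else acc' folded over a list is acc ++ a flatMap.
theorem pv_foldl_if_append {α β : Type} (l : List α) (c : α → Bool) (g : α → List β) :
    ∀ (acc : List β),
      l.foldl (fun a x => if c x then a ++ g x else a) acc
        = acc ++ l.flatMap (fun x => if c x then g x else []) := by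
  induction l with
  | nil => intro acc; simp
  | cons x xs ih =>
      intro acc
      simp only [List.foldl_cons, List.flatMap_cons, ih]
      by_cases h : c x = true <;> simp [h]

theorem pv_filter_flatMap {α β : Type} (l : List α) (c : α → Bool) (h : α → List β) :
    (l.filter c).flatMap h = l.flatMap (fun x => if c x then h x else []) := by
  induction l with
  | nil => simp
  | cons x xs ih =>
      by_cases hc : c x = true <;> simp [hc, ih]

theorem pv_flatMap_assoc {a b c : Type} (l : List a) (f : a → List b) (g : b → List c) :
    (l.flatMap f).flatMap g = l.flatMap (fun x => (f x).flatMap g) := by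
  induction l with
  | nil => simp
  | cons x xs ih => simp [ih]

-- go unfolded to flatMap form on a cons.
theorem pv_go_cons (d2 : List (String × Int)) (used : List String)
    (tr : List (String × String)) (key1 : String) (value1 : Int) (rest : List (String × Int)) :
    find_translations_py_go d2 used tr ((key1, value1) :: rest)
      = d2.flatMap (fun kv =>
          if !used.contains kv.1 && kv.2 == value1 then
            find_translations_py_go d2 (used ++ [kv.1]) (tr ++ [(key1, kv.1)]) rest
          else []) := by
  simp only [find_translations_py_go]
  rw [pv_foldl_if_append]
  simp

-- Main invariant: the BFS fold starting from a list of partials equals the concatenation of the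
-- DFS results started from each partial (with used = its values).
theorem pv_bfs_eq_dfs (d2 : List (String × Int)) :
    ∀ (keys1 : List (String × Int)) (ps : List (List (String × String))),
      List.foldl (fun results kv1 =>
        results.foldl (fun new p =>
          d2.foldl (fun new2 kv2 =>
            if kv2.2 == kv1.2 && !(p.map Prod.snd).contains kv2.1 then
              new2 ++ [p ++ [(kv1.1, kv2.1)]]
            else new2) new) []) ps keys1
      = ps.flatMap (fun p => find_translations_py_go d2 (p.map Prod.snd) p keys1) := by
  intro keys1
  induction keys1 with
  | nil =>
      intro ps
      simp [find_translations_py_go]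
  | cons kv1 rest ih =>
      intro ps
      rw [List.foldl_cons, ih]
      -- rewrite the one BFS step into flatMap form
      have hstep :
          ps.foldl (fun new p =>
            d2.foldl (fun new2 kv2 =>
              if kv2.2 == kv1.2 && !(p.map Prod.snd).contains kv2.1 then
                new2 ++ [p ++ [(kv1.1, kv2.1)]]
              else new2) new) []
          = ps.flatMap (fun p =>
              (d2.filter (fun kv2 => kv2.2 == kv1.2 && !(p.map Prod.snd).contains kv2.1)).map
                (fun kv2 => p ++ [(kv1.1, kv2.1)])) := by
        simp only [PySem.List.foldl_append_if]
        rw [PySem.List.foldl_append_eq_flatMap]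
        simp
      rw [hstep, pv_flatMap_assoc]
      refine List.flatMap_congr ?_  -- pointwise over p
      intro p _
      rw [List.flatMap_map, pv_filter_flatMap, pv_go_cons]
      refine List.flatMap_congr ?_
      intro kv2 _
      have hcomm : (kv2.2 == kv1.2 && !(p.map Prod.snd).contains kv2.1)
          = (!(p.map Prod.snd).contains kv2.1 && kv2.2 == kv1.2) := Bool.and_comm ..
      rw [hcomm]
      by_cases h : (!(p.map Prod.snd).contains kv2.1 && kv2.2 == kv1.2) = true <;>
        simp [h]

-- ===== VERDICT (by name: the statement is the Claim_ definition above) =====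
theorem find_translations_py_spec : Claim_equal_find_translations_py := by
  intro dict1 dict2 _
  unfold Spec_find_translations_py find_translations_py find_translations_py_alt
  by_cases h : pvValuesCounterEq dict1 dict2 = true
  · simp only [h]
    rw [pv_bfs_eq_dfs]
    simp
  · simp [h]
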